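-- pv_equiv track=rewrite | github.com/changmillet/TianGong-LCA-Spec-Coding | src/tiangong_lca_spec/lci_analysis/upstream/classifiers/rules.py | _classify_elementary_flow
-- ===== SOURCE A (Python) =====
-- def _classify_elementary_flow(classifications: tuple[str, ...]) -> tuple[str, str]:
--     lowered = [(label, label.lower()) for label in classifications]
--     for original, label in lowered:
--         if any(term in label for term in ("emission", "air", "water", "soil")):
--             return "emission", original
--     for original, label in lowered:
--         if "resource" in label or "natural resource" in label:
--             return "resource", original
--     return "emission", "elementary_flow_default"
-- ===== SOURCE B (Python) =====
-- def _classify_elementary_flow(classifications):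
--     candidate = None
--     for original in classifications:
--         label = original.lower()
--         if ("emission" in label or "air" in label
--                 or "water" in label or "soil" in label):
--             return "emission", original
--         if candidate is None and "resource" in label:
--             candidate = original
--     if candidate is not None:
--         return "resource", candidate
--     return "emission", "elementary_flow_default"
-- ===== Notes on version B (the rewrite author's own statement) =====
-- stated objective: simpler
-- what changed: Single pass with a remembered first resource candidate replaces A's two sequential scans over a precomputed lowered (original, lower) pair list, and the redundant 'natural resource' test (subsumed by 'resource') is dropped.
import Mathlib
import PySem

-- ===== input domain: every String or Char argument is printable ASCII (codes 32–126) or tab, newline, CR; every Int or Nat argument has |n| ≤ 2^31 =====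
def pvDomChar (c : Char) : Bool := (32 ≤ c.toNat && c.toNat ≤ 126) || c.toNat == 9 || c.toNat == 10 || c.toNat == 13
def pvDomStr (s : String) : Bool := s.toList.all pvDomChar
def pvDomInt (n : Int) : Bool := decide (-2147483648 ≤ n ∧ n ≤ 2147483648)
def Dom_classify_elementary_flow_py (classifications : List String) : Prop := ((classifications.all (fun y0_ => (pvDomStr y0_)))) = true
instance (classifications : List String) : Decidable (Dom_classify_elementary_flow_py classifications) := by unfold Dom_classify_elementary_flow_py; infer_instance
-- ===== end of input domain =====

-- B changes the decomposition: one pass with a remembered first resource candidate instead of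
-- A's two sequential scans, dropping the redundant 'natural resource' test (subsumed by 'resource').

-- ===== PORT A =====
-- first loop: return ("emission", original) at the first label containing an emission term
def pvALoop1 (lowered : List (String × String)) : Option (String × String) :=
  match lowered with
  | [] => none
  | (original, label) :: rest =>
    if (["emission", "air", "water", "soil"].any fun term => PySem.Str.isIn term label) then
      some ("emission", original)
    else pvALoop1 rest

-- second loop: return ("resource", original) at the first label containing "resource" or "natural resource"
def pvALoop2 (lowered : List (String × String)) : Option (String × String) :=
  match lowered with
  | [] => none
  | (original, label) :: rest =>
    if PySem.Str.isIn "resource" label || PySem.Str.isIn "natural resource" label then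
      some ("resource", original)
    else pvALoop2 rest

def classify_elementary_flow_py (classifications : List String) : String × String :=
  let lowered := classifications.map fun label => (label, PySem.Str.lower label)
  match pvALoop1 lowered with
  | some r => r
  | none =>
    match pvALoop2 lowered with
    | some r => r
    | none => ("emission", "elementary_flow_default")

-- ===== PORT B =====
def pvBLoop (classifications : List String) (candidate : Option String) : String × String :=
  match classifications with
  | [] =>
    match candidate with
    | some c => ("resource", c)
    | none => ("emission", "elementary_flow_default")
  | original :: rest =>
    let label := PySem.Str.lower original
    if PySem.Str.isIn "emission" label || PySem.Str.isIn "air" label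
        || PySem.Str.isIn "water" label || PySem.Str.isIn "soil" label then
      ("emission", original)
    else
      pvBLoop rest
        (if candidate.isNone && PySem.Str.isIn "resource" label then some original else candidate)

def classify_elementary_flow_py_alt (classifications : List String) : String × String :=
  pvBLoop classifications none

-- ===== PRECONDITION & SPEC =====
def Spec_classify_elementary_flow_py (classifications : List String) (out : String × String) : Prop := out = classify_elementary_flow_py_alt classifications
instance (classifications : List String) (out : String × String) : Decidable (Spec_classify_elementary_flow_py classifications out) := by unfold Spec_classify_elementary_flow_py; infer_instance

-- ===== CLAIM (what is proved, stated in full; the proofs are below) =====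
def Claim_equal_classify_elementary_flow_py : Prop := ∀ (classifications : List String), Dom_classify_elementary_flow_py classifications → Spec_classify_elementary_flow_py classifications (classify_elementary_flow_py classifications)

-- ===== LEMMAS AND PROOFS =====

-- "natural resource" in label is subsumed by "resource" in label
theorem resource_subsumes (label : String)
    (h : PySem.Str.isIn "resource" label = false) :
    PySem.Str.isIn "natural resource" label = false := by
  simp only [PySem.Str.isIn_eq] at *
  rw [PySem.Chars.isIn_eq_false_iff] at *
  intro hinf
  exact h (List.IsInfix.trans (by decide) hinf)

-- B's loop expressed through A's two loops, for any pending candidate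
theorem pvBLoop_eq (classifications : List String) (candidate : Option String) :
    pvBLoop classifications candidate =
      (let lowered := classifications.map fun label => (label, PySem.Str.lower label)
       match pvALoop1 lowered with
       | some r => r
       | none =>
         match candidate with
         | some c => ("resource", c)
         | none =>
           match pvALoop2 lowered with
           | some r => r
           | none => ("emission", "elementary_flow_default")) := by
  induction classifications generalizing candidate with
  | nil => cases candidate <;> rfl
  | cons x rest ih =>
    simp only [List.map_cons, pvBLoop, pvALoop1, pvALoop2, List.any_cons, List.any_nil,
      Bool.or_false, Bool.or_assoc]
    cases he : (PySem.Str.isIn "emission" (PySem.Str.lower x)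
        || (PySem.Str.isIn "air" (PySem.Str.lower x)
        || (PySem.Str.isIn "water" (PySem.Str.lower x)
        || PySem.Str.isIn "soil" (PySem.Str.lower x)))) with
    | true => rfl
    | false =>
      simp only [Bool.false_eq_true, if_false]
      rw [ih]
      cases candidate with
      | some c =>
        simp only [Option.isNone_some, Bool.false_and]
        cases pvALoop1 (List.map (fun label => (label, PySem.Str.lower label)) rest) <;> rfl
      | none =>
        simp only [Option.isNone_none, Bool.true_and]
        cases hres : PySem.Str.isIn "resource" (PySem.Str.lower x) with
        | true =>
          cases pvALoop1 (List.map (fun label => (label, PySem.Str.lower label)) rest) <;> rfl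
        | false =>
          simp only [Bool.false_eq_true, if_false, resource_subsumes _ hres, Bool.or_self]

-- ===== VERDICT (by name: the statement is the Claim_ definition above) =====
theorem classify_elementary_flow_py_spec : Claim_equal_classify_elementary_flow_py := by
  intro classifications _
  unfold Spec_classify_elementary_flow_py classify_elementary_flow_py classify_elementary_flow_py_alt
  rw [pvBLoop_eq]
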